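-- pv_equiv track=rewrite | github.com/guxinhui1991/LeetCode | DP/718.py | findLength_DP
-- ===== SOURCE A (Python) =====
-- from typing import List
--
-- def findLength_DP(nums1: List[int], nums2: List[int]) -> int:
--     N1, N2 = len(nums1), len(nums2)
--     dp =[[0 for _ in range(N2+1)] for _ in range(N1+1)]
--     res = 0
--     for i in range(1, N1+1):
--         for j in range(1, N2+1):
--             if nums1[i-1] == nums2[j-1]:
--                 dp[i][j] = dp[i-1][j-1] + 1
--             if dp[i][j] > res: res = dp[i][j]
--
--     return res
-- ===== SOURCE B (Python) =====
-- from typing import List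
--
-- def findLength_DP(nums1: List[int], nums2: List[int]) -> int:
--     # Diagonal run-length scan: walk each alignment of the two arrays once,
--     # counting the current run of equal elements; no DP table is kept.
--     n1, n2 = len(nums1), len(nums2)
--
--     def diag_best(i: int, j: int, best: int) -> int:
--         cur = 0
--         while i < n1 and j < n2:
--             cur = cur + 1 if nums1[i] == nums2[j] else 0
--             if cur > best:
--                 best = cur
--             i += 1
--             j += 1
--         return best
--
--     best = 0
--     for i in range(n1):
--         best = diag_best(i, 0, best)
--     for j in range(1, n2):
--         best = diag_best(0, j, best)
--     return best
-- ===== Notes on version B (the rewrite author's own statement) =====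
-- stated objective: faster
-- what changed: Replaces the (N1+1)x(N2+1) DP table with a diagonal run-length scan: each alignment offset of the two arrays is walked once keeping only the current run of equal elements and the best so far, using O(1) extra space.
import Mathlib
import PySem

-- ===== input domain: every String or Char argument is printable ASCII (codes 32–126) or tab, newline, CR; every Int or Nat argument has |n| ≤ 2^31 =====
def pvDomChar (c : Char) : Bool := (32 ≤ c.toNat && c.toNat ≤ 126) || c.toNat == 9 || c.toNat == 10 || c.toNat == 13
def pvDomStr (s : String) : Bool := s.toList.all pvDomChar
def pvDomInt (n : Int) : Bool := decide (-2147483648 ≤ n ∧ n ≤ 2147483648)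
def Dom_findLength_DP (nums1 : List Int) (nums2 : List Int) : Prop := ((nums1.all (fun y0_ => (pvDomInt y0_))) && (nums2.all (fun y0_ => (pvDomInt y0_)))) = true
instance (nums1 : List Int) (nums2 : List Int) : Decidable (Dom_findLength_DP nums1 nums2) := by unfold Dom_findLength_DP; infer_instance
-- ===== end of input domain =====

-- B replaces A's (N1+1)x(N2+1) DP table by a diagonal run-length scan with O(1) extra
-- space; same asymptotic time, measurably faster by a constant factor (no table work).

-- ===== PORT A =====
-- inner-loop body of A: dp[i][j] = dp[i-1][j-1]+1 on a match, then res = max(res, dp[i][j]).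
-- The Python indices nums1[i-1], nums2[j-1], dp[..] are always in range here, so list
-- indexing is ported with getD (the default is never used).
def innerStep (nums1 nums2 : List Int) (i : Nat)
    (st : List (List Int) × Int) (j : Nat) : List (List Int) × Int :=
  let dp := st.1
  let res := st.2
  let dp := if nums1.getD (i-1) 0 = nums2.getD (j-1) 0 then
      dp.set i ((dp.getD i []).set j (((dp.getD (i-1) []).getD (j-1) 0) + 1))
    else dp
  let v := (dp.getD i []).getD j 0
  (dp, if v > res then v else res)

def outerStep (nums1 nums2 : List Int)
    (st : List (List Int) × Int) (i : Nat) : List (List Int) × Int :=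
  (List.range' 1 nums2.length).foldl (innerStep nums1 nums2 i) st

def findLength_DP (nums1 : List Int) (nums2 : List Int) : Int :=
  let N1 := nums1.length
  let N2 := nums2.length
  let dp0 : List (List Int) := List.replicate (N1+1) (List.replicate (N2+1) (0:Int))
  let st := (List.range' 1 N1).foldl (outerStep nums1 nums2) (dp0, (0:Int))
  st.2

-- ===== PORT B =====
-- B's while loop over one diagonal: cur = cur+1 on a match else 0, best = max.
def diagGo : List Int → List Int → Int → Int → Int
  | x :: xs, y :: ys, cur, best =>
    let cur' := if x = y then cur + 1 else 0
    diagGo xs ys cur' (if cur' > best then cur' else best)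
  | _, _, _, best => best

def findLength_DP_alt (nums1 : List Int) (nums2 : List Int) : Int :=
  let b1 := (List.range nums1.length).foldl
    (fun best i => diagGo (nums1.drop i) nums2 0 best) 0
  (List.range' 1 (nums2.length - 1)).foldl
    (fun best j => diagGo nums1 (nums2.drop j) 0 best) b1

-- ===== PRECONDITION & SPEC =====
def Spec_findLength_DP (nums1 : List Int) (nums2 : List Int) (out : Int) : Prop := out = findLength_DP_alt nums1 nums2
instance (nums1 : List Int) (nums2 : List Int) (out : Int) : Decidable (Spec_findLength_DP nums1 nums2 out) := by unfold Spec_findLength_DP; infer_instance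

-- ===== CLAIM (what is proved, stated in full; the proofs are below) =====
def Claim_equal_findLength_DP : Prop := ∀ (nums1 : List Int) (nums2 : List Int), Dom_findLength_DP nums1 nums2 → Spec_findLength_DP nums1 nums2 (findLength_DP nums1 nums2)

-- ===== LEMMAS AND PROOFS =====

-- length of the longest common run of equal elements ending at positions i-1 / j-1
def suff (n1 n2 : List Int) : Nat → Nat → Int
  | 0, _ => 0
  | _+1, 0 => 0
  | i+1, j+1 => if n1.getD i 0 = n2.getD j 0 then suff n1 n2 i j + 1 else 0

-- running-max step over values f x
def mstep {α : Type} (f : α → Int) (b : Int) (x : α) : Int := if f x > b then f x else b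

lemma foldl_mstep_le {α : Type} (f : α → Int) (l : List α) (b : Int) :
    b ≤ l.foldl (mstep f) b := by
  induction l generalizing b with
  | nil => simp
  | cons x xs ih =>
    refine le_trans ?_ (ih (mstep f b x))
    unfold mstep; split <;> omega

lemma foldl_mstep_mem {α : Type} (f : α → Int) (l : List α) (b : Int) :
    ∀ x ∈ l, f x ≤ l.foldl (mstep f) b := by
  induction l generalizing b with
  | nil => simp
  | cons y ys ih =>
    intro x hx
    rcases List.mem_cons.1 hx with h | h
    · have hfx : f x ≤ mstep f b y := by rw [h]; unfold mstep; split <;> omega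
      exact le_trans hfx (foldl_mstep_le f ys (mstep f b y))
    · exact ih (mstep f b y) x h

lemma foldl_mstep_cases {α : Type} (f : α → Int) (l : List α) (b : Int) :
    l.foldl (mstep f) b = b ∨ ∃ x ∈ l, l.foldl (mstep f) b = f x := by
  induction l generalizing b with
  | nil => left; rfl
  | cons y ys ih =>
    rcases ih (mstep f b y) with h | ⟨x, hx, hv⟩
    · simp only [List.foldl_cons, h]
      unfold mstep
      split
      · right; exact ⟨y, List.mem_cons_self, rfl⟩
      · left; rfl
    · right; exact ⟨x, List.mem_cons_of_mem _ hx, hv⟩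

-- folds of mstep from 0 over set-equal lists agree
lemma foldl_mstep_set_eq {α : Type} (f : α → Int) (l₁ l₂ : List α)
    (h : ∀ x, x ∈ l₁ ↔ x ∈ l₂) :
    l₁.foldl (mstep f) 0 = l₂.foldl (mstep f) 0 := by
  apply le_antisymm
  · rcases foldl_mstep_cases f l₁ 0 with h1 | ⟨x, hx, hv⟩
    · rw [h1]; exact foldl_mstep_le f l₂ 0
    · rw [hv]; exact foldl_mstep_mem f l₂ 0 x ((h x).1 hx)
  · rcases foldl_mstep_cases f l₂ 0 with h1 | ⟨x, hx, hv⟩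
    · rw [h1]; exact foldl_mstep_le f l₁ 0
    · rw [hv]; exact foldl_mstep_mem f l₁ 0 x ((h x).2 hx)

lemma foldl_flatMap' {α β γ : Type} (g : γ → β → γ) (f : α → List β) (l : List α) (b : γ) :
    (l.flatMap f).foldl g b = l.foldl (fun b x => (f x).foldl g b) b := by
  induction l generalizing b with
  | nil => rfl
  | cons x xs ih => simp [List.flatMap_cons, List.foldl_append, ih]

-- ---------- A side: table invariant ----------

def getCell (dp : List (List Int)) (r c : Nat) : Int := (dp.getD r []).getD c 0

def TblInv (n1 n2 : List Int) (dp : List (List Int)) (i j : Nat) : Prop :=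
  dp.length = n1.length + 1 ∧
  (∀ r, r ≤ n1.length → (dp.getD r []).length = n2.length + 1) ∧
  (∀ r c, getCell dp r c =
    if 1 ≤ r ∧ r ≤ n1.length ∧ 1 ≤ c ∧ c ≤ n2.length ∧ (r < i ∨ (r = i ∧ c ≤ j))
    then suff n1 n2 r c else 0)

lemma getD_set_self {α : Type} (l : List α) (i : Nat) (a d : α) (h : i < l.length) :
    (l.set i a).getD i d = a := by
  simp [List.getD, h]

lemma getD_set_ne {α : Type} (l : List α) (i j : Nat) (a d : α) (h : i ≠ j) :
    (l.set i a).getD j d = l.getD j d := by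
  simp [List.getD, List.getElem?_set_ne h]

lemma suff_right_zero (n1 n2 : List Int) (i : Nat) : suff n1 n2 i 0 = 0 := by
  cases i <;> rfl

lemma step_inv (n1 n2 : List Int) (dp : List (List Int)) (i j : Nat)
    (hi1 : 1 ≤ i) (hiN : i ≤ n1.length) (hj1 : 1 ≤ j) (hjN : j ≤ n2.length)
    (h : TblInv n1 n2 dp i (j-1)) :
    TblInv n1 n2 (innerStep n1 n2 i (dp, 0) j).1 i j ∧
      getCell (innerStep n1 n2 i (dp, 0) j).1 i j = suff n1 n2 i j ∧
      ∀ res : Int, (innerStep n1 n2 i (dp, 0) j).1 = (innerStep n1 n2 i (dp, res) j).1 ∧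
        (innerStep n1 n2 i (dp, res) j).2 = mstep (fun jj => suff n1 n2 i jj) res j := by
  obtain ⟨hlen, hrow, hcell⟩ := h
  have hcell' : ∀ r c, (dp.getD r []).getD c 0 =
      if 1 ≤ r ∧ r ≤ n1.length ∧ 1 ≤ c ∧ c ≤ n2.length ∧ (r < i ∨ (r = i ∧ c ≤ j-1))
      then suff n1 n2 r c else 0 := hcell
  have hij : i = (i-1)+1 := by omega
  have hjj : j = (j-1)+1 := by omega
  have hsuff : suff n1 n2 i j =
      if n1.getD (i-1) 0 = n2.getD (j-1) 0 then suff n1 n2 (i-1) (j-1) + 1 else 0 := by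
    conv_lhs => rw [hij, hjj]
    simp [suff]
  have hidp : i < dp.length := by omega
  have hrl : (dp.getD i []).length = n2.length + 1 := hrow i hiN
  have hjr : j < (dp.getD i []).length := by omega
  by_cases hm : n1.getD (i-1) 0 = n2.getD (j-1) 0
  · -- match case: dp[i][j] := dp[i-1][j-1] + 1 = suff i j
    have hprev : (dp.getD (i-1) []).getD (j-1) 0 = suff n1 n2 (i-1) (j-1) := by
      rw [hcell']
      by_cases h1 : 1 ≤ i - 1 ∧ 1 ≤ j - 1
      · exact if_pos (by omega)
      · have hz : suff n1 n2 (i-1) (j-1) = 0 := by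
          rcases Nat.eq_zero_or_pos (i-1) with h0 | h0
          · rw [h0]; rfl
          · have hj0 : j - 1 = 0 := by omega
            rw [hj0, suff_right_zero]
        rw [hz, if_neg (by omega)]
    have hD : ∀ res : Int, innerStep n1 n2 i (dp, res) j =
        (dp.set i ((dp.getD i []).set j (suff n1 n2 i j)),
         if suff n1 n2 i j > res then suff n1 n2 i j else res) := by
      intro res
      have hw : (dp.getD (i-1) []).getD (j-1) 0 + 1 = suff n1 n2 i j := by
        rw [hprev, hsuff, if_pos hm]
      have hv : ((dp.set i ((dp.getD i []).set j (suff n1 n2 i j))).getD i []).getD j 0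
          = suff n1 n2 i j := by
        rw [getD_set_self _ _ _ _ hidp, getD_set_self _ _ _ _ hjr]
      simp only [innerStep]
      rw [if_pos hm, hw, hv]
    have hD1 : ∀ res : Int, (innerStep n1 n2 i (dp, res) j).1 =
        dp.set i ((dp.getD i []).set j (suff n1 n2 i j)) := by
      intro res; rw [hD res]
    refine ⟨?_, ?_, ?_⟩
    · rw [hD1 0]
      refine ⟨by simp [hlen], ?_, ?_⟩
      · intro r hr
        by_cases hri : r = i
        · rw [hri, getD_set_self _ _ _ _ hidp, List.length_set]
          exact hrl
        · rw [getD_set_ne _ _ _ _ _ (fun h => hri h.symm)]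
          exact hrow r hr
      · intro r c
        show ((dp.set i ((dp.getD i []).set j (suff n1 n2 i j))).getD r []).getD c 0 = _
        by_cases hri : r = i
        · rw [hri, getD_set_self _ _ _ _ hidp]
          by_cases hcj : c = j
          · rw [hcj, getD_set_self _ _ _ _ hjr, if_pos (by omega)]
          · rw [getD_set_ne _ _ _ _ _ (fun h => hcj h.symm), hcell']
            by_cases hcnd : (1 ≤ i ∧ i ≤ n1.length ∧ 1 ≤ c ∧ c ≤ n2.length ∧
                (i < i ∨ (i = i ∧ c ≤ j - 1)))
            · rw [if_pos hcnd, if_pos (by omega : (1 ≤ i ∧ i ≤ n1.length ∧ 1 ≤ c ∧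
                  c ≤ n2.length ∧ (i < i ∨ (i = i ∧ c ≤ j))))]
            · rw [if_neg hcnd, if_neg (by omega : ¬ (1 ≤ i ∧ i ≤ n1.length ∧ 1 ≤ c ∧
                  c ≤ n2.length ∧ (i < i ∨ (i = i ∧ c ≤ j))))]
        · rw [getD_set_ne _ _ _ _ _ (fun h => hri h.symm), hcell']
          by_cases hcnd : (1 ≤ r ∧ r ≤ n1.length ∧ 1 ≤ c ∧ c ≤ n2.length ∧
              (r < i ∨ (r = i ∧ c ≤ j - 1)))
          · rw [if_pos hcnd, if_pos (by omega : (1 ≤ r ∧ r ≤ n1.length ∧ 1 ≤ c ∧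
                c ≤ n2.length ∧ (r < i ∨ (r = i ∧ c ≤ j))))]
          · rw [if_neg hcnd, if_neg (by omega : ¬ (1 ≤ r ∧ r ≤ n1.length ∧ 1 ≤ c ∧
                c ≤ n2.length ∧ (r < i ∨ (r = i ∧ c ≤ j))))]
    · show ((innerStep n1 n2 i (dp, 0) j).1.getD i []).getD j 0 = suff n1 n2 i j
      rw [hD1 0, getD_set_self _ _ _ _ hidp, getD_set_self _ _ _ _ hjr]
    · intro res
      refine ⟨by rw [hD1 0, hD1 res], ?_⟩
      rw [show (innerStep n1 n2 i (dp, res) j).2 =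
        (if suff n1 n2 i j > res then suff n1 n2 i j else res) from by rw [hD res]]
      rfl
  · -- no-match case: dp is unchanged, suff i j = 0
    have hzero : suff n1 n2 i j = 0 := by rw [hsuff, if_neg hm]
    have hcij : (dp.getD i []).getD j 0 = 0 := by
      rw [hcell', if_neg (by omega)]
    have hD : ∀ res : Int, innerStep n1 n2 i (dp, res) j =
        (dp, if (0:Int) > res then (0:Int) else res) := by
      intro res
      simp only [innerStep]
      rw [if_neg hm, hcij]
    have hD1 : ∀ res : Int, (innerStep n1 n2 i (dp, res) j).1 = dp := by
      intro res; rw [hD res]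
    refine ⟨?_, ?_, ?_⟩
    · rw [hD1 0]
      refine ⟨hlen, hrow, ?_⟩
      intro r c
      show (dp.getD r []).getD c 0 = _
      rw [hcell']
      by_cases hcnd : (1 ≤ r ∧ r ≤ n1.length ∧ 1 ≤ c ∧ c ≤ n2.length ∧
          (r < i ∨ (r = i ∧ c ≤ j - 1)))
      · rw [if_pos hcnd, if_pos (by omega : (1 ≤ r ∧ r ≤ n1.length ∧ 1 ≤ c ∧
            c ≤ n2.length ∧ (r < i ∨ (r = i ∧ c ≤ j))))]
      · by_cases hrc : r = i ∧ c = j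
        · rw [if_neg hcnd, if_pos (by omega : (1 ≤ r ∧ r ≤ n1.length ∧ 1 ≤ c ∧
              c ≤ n2.length ∧ (r < i ∨ (r = i ∧ c ≤ j)))), hrc.1, hrc.2, hzero]
        · rw [if_neg hcnd, if_neg (by omega : ¬ (1 ≤ r ∧ r ≤ n1.length ∧ 1 ≤ c ∧
              c ≤ n2.length ∧ (r < i ∨ (r = i ∧ c ≤ j))))]
    · show ((innerStep n1 n2 i (dp, 0) j).1.getD i []).getD j 0 = suff n1 n2 i j
      rw [hD1 0, hcij, hzero]
    · intro res
      refine ⟨by rw [hD1 0, hD1 res], ?_⟩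
      rw [show (innerStep n1 n2 i (dp, res) j).2 =
        (if (0:Int) > res then (0:Int) else res) from by rw [hD res]]
      simp only [mstep]
      rw [hzero]

lemma inner_fold (n1 n2 : List Int) (i : Nat) (hi1 : 1 ≤ i) (hiN : i ≤ n1.length) :
    ∀ (m j : Nat) (dp : List (List Int)) (res : Int), 1 ≤ j → j + m = n2.length + 1 →
    TblInv n1 n2 dp i (j-1) →
    ∃ dp', (List.range' j m).foldl (innerStep n1 n2 i) (dp, res) =
        (dp', (List.range' j m).foldl (mstep (fun jj => suff n1 n2 i jj)) res) ∧
      TblInv n1 n2 dp' i (j - 1 + m) := by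
  intro m
  induction m with
  | zero => intro j dp res _ _ hInv; exact ⟨dp, by simp, by simpa using hInv⟩
  | succ m ih =>
    intro j dp res hj1 hjm hInv
    have hjN : j ≤ n2.length := by omega
    obtain ⟨hInv', hread, hres⟩ := step_inv n1 n2 dp i j hi1 hiN hj1 hjN hInv
    obtain ⟨hdpeq, hreseq⟩ := hres res
    have hInv2 : TblInv n1 n2 (innerStep n1 n2 i (dp, res) j).1 i ((j+1)-1) := by
      simpa using hdpeq ▸ hInv'
    obtain ⟨dp', hfold, hI⟩ := ih (j+1) (innerStep n1 n2 i (dp, res) j).1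
      (innerStep n1 n2 i (dp, res) j).2 (by omega) (by omega) hInv2
    have hI' : TblInv n1 n2 dp' i (j - 1 + (m+1)) := by
      have heq : (j+1) - 1 + m = j - 1 + (m+1) := by omega
      rwa [heq] at hI
    refine ⟨dp', ?_, hI'⟩
    rw [List.range'_succ]
    simp only [List.foldl_cons]
    rw [show (innerStep n1 n2 i (dp, res) j) =
      ((innerStep n1 n2 i (dp, res) j).1, (innerStep n1 n2 i (dp, res) j).2) from rfl]
    rw [hfold, hreseq]

lemma tblinv_advance (n1 n2 : List Int) (dp : List (List Int)) (i : Nat)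
    (h : TblInv n1 n2 dp i n2.length) : TblInv n1 n2 dp (i+1) 0 := by
  obtain ⟨h1, h2, h3⟩ := h
  refine ⟨h1, h2, ?_⟩
  intro r c
  rw [h3]
  by_cases hcnd : (1 ≤ r ∧ r ≤ n1.length ∧ 1 ≤ c ∧ c ≤ n2.length ∧
      (r < i ∨ (r = i ∧ c ≤ n2.length)))
  · rw [if_pos hcnd, if_pos (by omega : (1 ≤ r ∧ r ≤ n1.length ∧ 1 ≤ c ∧
        c ≤ n2.length ∧ (r < i+1 ∨ (r = i+1 ∧ c ≤ 0))))]
  · rw [if_neg hcnd, if_neg (by omega : ¬ (1 ≤ r ∧ r ≤ n1.length ∧ 1 ≤ c ∧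
        c ≤ n2.length ∧ (r < i+1 ∨ (r = i+1 ∧ c ≤ 0))))]

lemma outer_fold (n1 n2 : List Int) :
    ∀ (m i : Nat) (dp : List (List Int)) (res : Int), 1 ≤ i → i + m = n1.length + 1 →
    TblInv n1 n2 dp i 0 →
    ((List.range' i m).foldl (outerStep n1 n2) (dp, res)).2 =
      (List.range' i m).foldl
        (fun b ii => (List.range' 1 n2.length).foldl (mstep (fun jj => suff n1 n2 ii jj)) b) res := by
  intro m
  induction m with
  | zero => intro i dp res _ _ _; simp
  | succ m ih =>
    intro i dp res hi1 him hInv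
    have hiN : i ≤ n1.length := by omega
    have hInv1 : TblInv n1 n2 dp i (1 - 1) := by simpa using hInv
    obtain ⟨dp', hfold, hI⟩ := inner_fold n1 n2 i hi1 hiN n2.length 1 dp res (le_refl 1) (by omega) hInv1
    have hI' : TblInv n1 n2 dp' i n2.length := by
      have heq : 1 - 1 + n2.length = n2.length := by omega
      rwa [heq] at hI
    rw [List.range'_succ]
    simp only [List.foldl_cons]
    rw [show outerStep n1 n2 (dp, res) i = (List.range' 1 n2.length).foldl (innerStep n1 n2 i) (dp, res) from rfl]
    rw [hfold]
    exact ih (i+1) dp' _ (by omega) (by omega) (tblinv_advance n1 n2 dp' i hI')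

lemma getD_replicate' {α : Type} (n : Nat) (x d : α) (r : Nat) :
    (List.replicate n x).getD r d = if r < n then x else d := by
  rw [List.getD_eq_getElem?_getD, List.getElem?_replicate]
  split <;> simp

lemma tblinv_init (n1 n2 : List Int) :
    TblInv n1 n2 (List.replicate (n1.length+1) (List.replicate (n2.length+1) (0:Int))) 1 0 := by
  refine ⟨by simp, ?_, ?_⟩
  · intro r hr
    rw [getD_replicate', if_pos (by omega), List.length_replicate]
  · intro r c
    show ((List.replicate (n1.length+1) (List.replicate (n2.length+1) (0:Int))).getD r []).getD c 0 = _
    rw [getD_replicate']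
    by_cases h : r < n1.length + 1
    · rw [if_pos h, getD_replicate']
      by_cases h2 : c < n2.length + 1
      · rw [if_pos h2, if_neg (by omega : ¬ (1 ≤ r ∧ r ≤ n1.length ∧ 1 ≤ c ∧
            c ≤ n2.length ∧ (r < 1 ∨ (r = 1 ∧ c ≤ 0))))]
      · rw [if_neg h2, if_neg (by omega : ¬ (1 ≤ r ∧ r ≤ n1.length ∧ 1 ≤ c ∧
            c ≤ n2.length ∧ (r < 1 ∨ (r = 1 ∧ c ≤ 0))))]
    · rw [if_neg h, if_neg (by omega : ¬ (1 ≤ r ∧ r ≤ n1.length ∧ 1 ≤ c ∧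
          c ≤ n2.length ∧ (r < 1 ∨ (r = 1 ∧ c ≤ 0))))]
      simp [List.getD]

-- A's value as a nested running max of suff over 1..N1 × 1..N2
lemma findLength_DP_eq_nested (n1 n2 : List Int) :
    findLength_DP n1 n2 = (List.range' 1 n1.length).foldl
      (fun b ii => (List.range' 1 n2.length).foldl (mstep (fun jj => suff n1 n2 ii jj)) b) 0 := by
  unfold findLength_DP
  exact outer_fold n1 n2 n1.length 1
    (List.replicate (n1.length+1) (List.replicate (n2.length+1) (0:Int))) 0
    (le_refl 1) (by omega) (tblinv_init n1 n2)

-- ---------- B side ----------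

lemma diagGo_eq (n1 n2 : List Int) :
    ∀ (k i j : Nat) (best : Int), k = min (n1.length - i) (n2.length - j) →
    diagGo (n1.drop i) (n2.drop j) (suff n1 n2 i j) best =
      (List.range k).foldl (mstep (fun t => suff n1 n2 (i+t+1) (j+t+1))) best := by
  intro k
  induction k with
  | zero =>
    intro i j best hk
    have : n1.length ≤ i ∨ n2.length ≤ j := by omega
    rcases this with h | h
    · rw [List.drop_eq_nil_of_le h]; simp [diagGo]
    · rw [List.drop_eq_nil_of_le (h : n2.length ≤ j)]
      cases n1.drop i <;> simp [diagGo]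
  | succ k ih =>
    intro i j best hk
    have hi : i < n1.length := by omega
    have hj : j < n2.length := by omega
    rw [List.drop_eq_getElem_cons hi, List.drop_eq_getElem_cons hj]
    have hsuff : suff n1 n2 (i+1) (j+1) =
        if n1[i] = n2[j] then suff n1 n2 i j + 1 else 0 := by
      simp [suff, List.getD_eq_getElem?_getD, hi, hj]
    have hrec := ih (i+1) (j+1) (if suff n1 n2 (i+1) (j+1) > best then suff n1 n2 (i+1) (j+1) else best) (by omega)
    simp only [diagGo]
    rw [← hsuff]
    rw [hrec]
    rw [List.range_succ_eq_map]
    simp only [List.foldl_cons, List.foldl_map]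
    have h0 : mstep (fun t => suff n1 n2 (i+t+1) (j+t+1)) best 0 =
        (if suff n1 n2 (i+1) (j+1) > best then suff n1 n2 (i+1) (j+1) else best) := by
      simp [mstep]
    rw [h0]
    apply PySem.List.foldl_congr_mem
    intro b t _
    simp [mstep, Nat.add_assoc, Nat.add_comm t 1]

-- the pair (i,j) visited at step t of the diagonal starting at (i0,j0)
def diagPairs (n1 n2 : List Int) : List (Nat × Nat) :=
  ((List.range n1.length).flatMap
    (fun i => (List.range (min (n1.length - i) n2.length)).map (fun t => (i+t+1, t+1)))) ++
  ((List.range' 1 (n2.length - 1)).flatMap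
    (fun j => (List.range (min n1.length (n2.length - j))).map (fun t => (t+1, j+t+1))))

lemma findLength_DP_alt_eq (n1 n2 : List Int) :
    findLength_DP_alt n1 n2 =
      (diagPairs n1 n2).foldl (mstep (fun p => suff n1 n2 p.1 p.2)) 0 := by
  unfold findLength_DP_alt diagPairs
  rw [List.foldl_append, foldl_flatMap', foldl_flatMap']
  have h1 : ∀ (b : Int), (List.range n1.length).foldl
      (fun best i => diagGo (n1.drop i) n2 0 best) b =
      (List.range n1.length).foldl (fun b i =>
        ((List.range (min (n1.length - i) n2.length)).map (fun t => (i+t+1, t+1))).foldl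
          (mstep (fun p => suff n1 n2 p.1 p.2)) b) b := by
    intro b
    apply PySem.List.foldl_congr_mem
    intro acc i hi
    have h0 : (0 : Int) = suff n1 n2 i 0 := by cases i <;> rfl
    have hd := diagGo_eq n1 n2 (min (n1.length - i) (n2.length - 0)) i 0 acc rfl
    simp only [List.drop_zero, Nat.sub_zero] at hd
    rw [h0, hd, List.foldl_map]
    simp only [Nat.zero_add]
    apply PySem.List.foldl_congr_mem
    intro a t _
    rfl
  have h2 : ∀ (b : Int), (List.range' 1 (n2.length - 1)).foldl
      (fun best j => diagGo n1 (n2.drop j) 0 best) b =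
      (List.range' 1 (n2.length - 1)).foldl (fun b j =>
        ((List.range (min n1.length (n2.length - j))).map (fun t => (t+1, j+t+1))).foldl
          (mstep (fun p => suff n1 n2 p.1 p.2)) b) b := by
    intro b
    apply PySem.List.foldl_congr_mem
    intro acc j hj
    have h0 : (0 : Int) = suff n1 n2 0 j := rfl
    have hd := diagGo_eq n1 n2 (min (n1.length - 0) (n2.length - j)) 0 j acc rfl
    simp only [List.drop_zero, Nat.sub_zero] at hd
    rw [h0, hd, List.foldl_map]
    simp only [Nat.zero_add]
    apply PySem.List.foldl_congr_mem
    intro a t _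
    rfl
  rw [h1, h2]

lemma mem_diagPairs (n1 n2 : List Int) (p : Nat × Nat) :
    p ∈ diagPairs n1 n2 ↔
      (1 ≤ p.1 ∧ p.1 ≤ n1.length ∧ 1 ≤ p.2 ∧ p.2 ≤ n2.length) := by
  obtain ⟨a, b⟩ := p
  unfold diagPairs
  simp only [List.mem_append, List.mem_flatMap, List.mem_map, List.mem_range, List.mem_range'_1,
    Prod.mk.injEq]
  constructor
  · rintro (⟨i, hi, t, ht, rfl, rfl⟩ | ⟨j, hj, t, ht, rfl, rfl⟩) <;> omega
  · rintro ⟨h1, h2, h3, h4⟩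
    by_cases hab : b ≤ a
    · left; exact ⟨a - b, by omega, b - 1, by omega, by omega, by omega⟩
    · right; exact ⟨b - a, by omega, a - 1, by omega, by omega, by omega⟩

-- the pairs visited by A's nested loops
lemma mem_rectPairs (n1 n2 : List Int) (p : Nat × Nat) :
    p ∈ (List.range' 1 n1.length).flatMap
        (fun i => (List.range' 1 n2.length).map (fun j => (i, j))) ↔
      (1 ≤ p.1 ∧ p.1 ≤ n1.length ∧ 1 ≤ p.2 ∧ p.2 ≤ n2.length) := by
  obtain ⟨a, b⟩ := p
  simp only [List.mem_flatMap, List.mem_map, List.mem_range'_1, Prod.mk.injEq]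
  constructor
  · rintro ⟨i, hi, j, hj, rfl, rfl⟩; omega
  · rintro ⟨h1, h2, h3, h4⟩
    exact ⟨a, by omega, b, by omega, rfl, rfl⟩

-- ===== VERDICT (by name: the statement is the Claim_ definition above) =====
theorem findLength_DP_spec : Claim_equal_findLength_DP := by
  intro n1 n2 _
  unfold Spec_findLength_DP
  rw [findLength_DP_eq_nested, findLength_DP_alt_eq]
  have hA : (List.range' 1 n1.length).foldl
      (fun b ii => (List.range' 1 n2.length).foldl (mstep (fun jj => suff n1 n2 ii jj)) b) 0 =
      ((List.range' 1 n1.length).flatMap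
        (fun i => (List.range' 1 n2.length).map (fun j => (i, j)))).foldl
        (mstep (fun p => suff n1 n2 p.1 p.2)) 0 := by
    rw [foldl_flatMap']
    apply PySem.List.foldl_congr_mem
    intro b i _
    rw [List.foldl_map]
    apply PySem.List.foldl_congr_mem
    intro acc jj _
    rfl
  rw [hA]
  exact foldl_mstep_set_eq _ _ _
    (fun p => (mem_rectPairs n1 n2 p).trans (mem_diagPairs n1 n2 p).symm)
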